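-- pv_equiv track=rewrite | github.com/seungkilee-cs/HistoFlow | services/region-detector/src/tile_levels.py | select_analysis_level
-- ===== SOURCE A (Python) =====
-- from typing import Iterable
--
-- def select_analysis_level(
--     available_levels: Iterable[int],
--     requested_level: int | None = None,
--     default_level: int | None = None,
-- ) -> int:
--     levels = sorted(set(int(level) for level in available_levels))
--     if not levels:
--         raise ValueError("No tile levels are available for analysis")
--
--     if requested_level is None and default_level is None:
--         raise ValueError("A requested level or default level is required")
--
--     target = requested_level if requested_level is not None else default_level
--
--     return min(
--         levels,
--         key=lambda level: (abs(level - target), level > target, level),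
--     )
-- ===== SOURCE B (Python) =====
-- def select_analysis_level(available_levels, requested_level=None, default_level=None):
--     levels = [int(level) for level in available_levels]
--     if not levels:
--         raise ValueError("No tile levels are available for analysis")
--     if requested_level is None and default_level is None:
--         raise ValueError("A requested level or default level is required")
--
--     target = requested_level if requested_level is not None else default_level
--
--     # Nearest neighbour without sorting: best candidate on each side of target,
--     # then a single comparison that breaks ties toward the lower level.
--     lo = max((level for level in levels if level <= target), default=None)
--     hi = min((level for level in levels if level > target), default=None)
--     if lo is None:
--         return hi
--     if hi is None:
--         return lo
--     return hi if hi - target < target - lo else lo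
-- ===== Notes on version B (the rewrite author's own statement) =====
-- stated objective: faster
-- what changed: Replaces sort(set(...)) plus a 3-tuple-key min scan by a sort-free single pass: the closest level <= target (max of that side) and the closest level > target (min of that side) are computed directly and one comparison (tie toward the lower side) picks between them.
import Mathlib
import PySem

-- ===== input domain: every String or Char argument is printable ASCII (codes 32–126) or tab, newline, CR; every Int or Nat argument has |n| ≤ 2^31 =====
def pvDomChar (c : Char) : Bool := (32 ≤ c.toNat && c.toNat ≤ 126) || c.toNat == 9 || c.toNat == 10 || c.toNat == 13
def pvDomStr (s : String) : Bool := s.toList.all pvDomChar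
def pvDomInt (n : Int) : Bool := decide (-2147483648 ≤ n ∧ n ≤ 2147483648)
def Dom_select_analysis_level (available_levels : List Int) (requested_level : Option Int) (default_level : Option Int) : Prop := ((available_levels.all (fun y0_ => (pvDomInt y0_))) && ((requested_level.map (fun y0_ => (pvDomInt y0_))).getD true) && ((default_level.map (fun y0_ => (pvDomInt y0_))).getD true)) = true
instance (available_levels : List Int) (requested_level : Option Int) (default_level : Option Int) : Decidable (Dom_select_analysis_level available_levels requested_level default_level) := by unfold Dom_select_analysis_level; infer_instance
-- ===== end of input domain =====

-- B drops the sort/set and finds the nearest level in one pass (best candidate on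
-- each side of target, tie toward the lower one); same result, no sort.

-- ===== PORT A =====
-- abs(x)
def pyAbs (x : Int) : Int := if x < 0 then -x else x

-- the lambda's tuple key (abs(level-target), level > target, level) compared
-- lexicographically, Python-style (False < True): keyLt t a b ↔ key(a) < key(b)
def keyLt (t a b : Int) : Bool :=
  pyAbs (a - t) < pyAbs (b - t) ||
  (pyAbs (a - t) == pyAbs (b - t) &&
    ((!(decide (a > t)) && decide (b > t)) ||
     ((decide (a > t) == decide (b > t)) && decide (a < b))))

def select_analysis_level (available_levels : List Int) (requested_level : Option Int) (default_level : Option Int) : Int :=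
  -- levels = sorted(set(int(level) for level in available_levels))
  let levels := PySem.List.sorted (PySem.Set.ofList available_levels) (fun x => x) false
  match levels with
  | [] => 0  -- raise ValueError("No tile levels are available for analysis"): excluded by Pre_
  | h :: tl =>
    match requested_level, default_level with
    | none, none => 0  -- raise ValueError("A requested level or default level is required"): excluded by Pre_
    | _, _ =>
      let target := match requested_level with | some r => r | none => default_level.getD 0
      -- min(levels, key=...) = scan keeping the first element with minimal key
      tl.foldl (fun best x => if keyLt target x best then x else best) h

-- ===== PORT B =====
def select_analysis_level_alt (available_levels : List Int) (requested_level : Option Int) (default_level : Option Int) : Int :=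
  let levels := available_levels   -- int(level) is the identity on Int
  if levels.isEmpty then 0  -- raise ValueError: excluded by Pre_
  else if requested_level.isNone && default_level.isNone then 0  -- raise ValueError: excluded by Pre_
  else
    let target := requested_level.getD (default_level.getD 0)
    let lo := PySem.List.max? (levels.filter (fun l => decide (l ≤ target))) (fun x => x)
    let hi := PySem.List.min? (levels.filter (fun l => decide (l > target))) (fun x => x)
    match lo, hi with
    | none, some h => h
    | some l, none => l
    | some l, some h => if h - target < target - l then h else l
    | none, none => 0  -- unreachable: levels is nonempty

-- ===== PRECONDITION & SPEC =====
-- Pre_ excludes exactly the inputs on which A raises ValueError: an empty level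
-- list, or requested_level and default_level both None.
def Pre_select_analysis_level (available_levels : List Int) (requested_level : Option Int) (default_level : Option Int) : Prop :=
  available_levels ≠ [] ∧ ¬ (requested_level = none ∧ default_level = none)
instance (available_levels : List Int) (requested_level : Option Int) (default_level : Option Int) : Decidable (Pre_select_analysis_level available_levels requested_level default_level) := by unfold Pre_select_analysis_level; infer_instance

def pvWitness_select_analysis_level : List Int × Option Int × Option Int := ([0, 3], some 2, none)

def Spec_select_analysis_level (available_levels : List Int) (requested_level : Option Int) (default_level : Option Int) (out : Int) : Prop := out = select_analysis_level_alt available_levels requested_level default_level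
instance (available_levels : List Int) (requested_level : Option Int) (default_level : Option Int) (out : Int) : Decidable (Spec_select_analysis_level available_levels requested_level default_level out) := by unfold Spec_select_analysis_level; infer_instance

-- ===== CLAIM (what is proved, stated in full; the proofs are below) =====
def Claim_equal_select_analysis_level : Prop := ∀ (available_levels : List Int) (requested_level : Option Int) (default_level : Option Int), Dom_select_analysis_level available_levels requested_level default_level → Pre_select_analysis_level available_levels requested_level default_level → Spec_select_analysis_level available_levels requested_level default_level (select_analysis_level available_levels requested_level default_level)

-- ===== LEMMAS AND PROOFS =====

-- "m is a minimizer of the key over the members of xs"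
def IsMinKey (t : Int) (xs : List Int) (m : Int) : Prop :=
  m ∈ xs ∧ ∀ x ∈ xs, keyLt t x m = false

theorem keyLt_irrefl (t a : Int) : keyLt t a a = false := by
  simp [keyLt, pyAbs]

theorem keyLt_trans (t a b c : Int) (h1 : keyLt t a b = true) (h2 : keyLt t b c = true) :
    keyLt t a c = true := by
  simp only [keyLt, pyAbs] at *
  split_ifs at * <;> simp_all <;> omega

theorem keyLt_antisymm (t a b : Int) (h1 : keyLt t a b = false) (h2 : keyLt t b a = false) :
    a = b := by
  simp only [keyLt, pyAbs] at *
  split_ifs at * <;> simp_all <;> omega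

-- the min-scan fold of port A produces a minimizer of the key
theorem fold_min_isMinKey (t : Int) (tl : List Int) (h : Int) :
    IsMinKey t (h :: tl) (tl.foldl (fun best x => if keyLt t x best then x else best) h) := by
  induction tl generalizing h with
  | nil =>
    refine ⟨List.mem_singleton.mpr rfl, ?_⟩
    intro x hx
    simp only [List.foldl_nil, List.mem_singleton] at *
    subst hx
    exact keyLt_irrefl t x
  | cons a tl ih =>
    simp only [List.foldl_cons]
    by_cases hc : keyLt t a h = true
    · simp only [hc, if_true]
      obtain ⟨hmem, hmin⟩ := ih a
      refine ⟨?_, ?_⟩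
      · exact List.mem_cons_of_mem _ hmem
      · intro x hx
        rcases List.mem_cons.mp hx with heq | hx'
        · subst heq
          cases hv : keyLt t x (tl.foldl (fun best y => if keyLt t y best then y else best) a) with
          | false => rfl
          | true =>
            exfalso
            have := keyLt_trans t a x _ hc hv
            have hna := hmin a List.mem_cons_self
            simp [this] at hna
        · exact hmin x hx'
    · simp only [Bool.not_eq_true] at hc
      simp only [hc, Bool.false_eq_true, if_false]
      obtain ⟨hmem, hmin⟩ := ih h
      refine ⟨?_, ?_⟩
      · rcases List.mem_cons.mp hmem with heq | h1
        · rw [heq]; exact List.mem_cons_self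
        · exact List.mem_cons_of_mem _ (List.mem_cons_of_mem _ h1)
      · intro x hx
        rcases List.mem_cons.mp hx with heq | hx'
        · subst heq; exact hmin x List.mem_cons_self
        · rcases List.mem_cons.mp hx' with heq | hx''
          · subst heq
            cases hv : keyLt t x (tl.foldl (fun best y => if keyLt t y best then y else best) h) with
            | false => rfl
            | true =>
              exfalso
              have hh := hmin h List.mem_cons_self
              by_cases hhx : keyLt t h x = true
              · have := keyLt_trans t h x _ hhx hv
                simp [this] at hh
              · simp only [Bool.not_eq_true] at hhx
                have := keyLt_antisymm t x h hc hhx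
                subst this
                simp [hv] at hh
          · exact hmin x (List.mem_cons_of_mem _ hx'')

-- the two-sided candidate choice of port B produces a minimizer of the key
theorem alt_choice_isMinKey (t : Int) (xs : List Int) (hne : xs ≠ []) :
    IsMinKey t xs
      (match PySem.List.max? (xs.filter (fun l => decide (l ≤ t))) (fun x => x),
             PySem.List.min? (xs.filter (fun l => decide (l > t))) (fun x => x) with
       | none, some h => h
       | some l, none => l
       | some l, some h => if h - t < t - l then h else l
       | none, none => 0) := by
  cases hlo : PySem.List.max? (xs.filter (fun l => decide (l ≤ t))) (fun x => x) with
  | none =>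
    have hloe : xs.filter (fun l => decide (l ≤ t)) = [] := (PySem.List.max?_eq_none_iff _ _).mp hlo
    cases hhi : PySem.List.min? (xs.filter (fun l => decide (l > t))) (fun x => x) with
    | none =>
      exfalso
      have hhie : xs.filter (fun l => decide (l > t)) = [] := (PySem.List.min?_eq_none_iff _ _).mp hhi
      obtain ⟨x, hx⟩ := List.exists_mem_of_ne_nil xs hne
      by_cases hxt : x ≤ t
      · have : x ∈ xs.filter (fun l => decide (l ≤ t)) := List.mem_filter.mpr ⟨hx, by simpa⟩
        simp [hloe] at this
      · have : x ∈ xs.filter (fun l => decide (l > t)) := List.mem_filter.mpr ⟨hx, by simp; omega⟩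
        simp [hhie] at this
    | some h =>
      have hmem := PySem.List.min?_mem hhi
      have hmin := PySem.List.min?_isMin hhi
      have hh : h ∈ xs ∧ h > t := by
        have := List.mem_filter.mp hmem
        exact ⟨this.1, by simpa using this.2⟩
      refine ⟨hh.1, ?_⟩
      intro x hx
      have hxgt : x > t := by
        by_contra hxle
        have : x ∈ xs.filter (fun l => decide (l ≤ t)) := List.mem_filter.mpr ⟨hx, by simp; omega⟩
        simp [hloe] at this
      have hxh : h ≤ x := hmin x (List.mem_filter.mpr ⟨hx, by simp; omega⟩)
      simp only [keyLt, pyAbs]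
      split_ifs <;> simp <;> omega
  | some l =>
    have hlmem := PySem.List.max?_mem hlo
    have hlmax := PySem.List.max?_isMax hlo
    have hl : l ∈ xs ∧ l ≤ t := by
      have := List.mem_filter.mp hlmem
      exact ⟨this.1, by simpa using this.2⟩
    have hlBound : ∀ x ∈ xs, x ≤ t → x ≤ l := by
      intro x hx hxt; exact hlmax x (List.mem_filter.mpr ⟨hx, by simpa⟩)
    cases hhi : PySem.List.min? (xs.filter (fun l => decide (l > t))) (fun x => x) with
    | none =>
      have hhie : xs.filter (fun l => decide (l > t)) = [] := (PySem.List.min?_eq_none_iff _ _).mp hhi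
      refine ⟨hl.1, ?_⟩
      intro x hx
      have hxle : x ≤ t := by
        by_contra hgt
        have : x ∈ xs.filter (fun l => decide (l > t)) := List.mem_filter.mpr ⟨hx, by simp; omega⟩
        simp [hhie] at this
      have := hlBound x hx hxle
      have hlt := hl.2
      simp only [keyLt, pyAbs]
      split_ifs <;> simp <;> omega
    | some h =>
      have hhmem := PySem.List.min?_mem hhi
      have hhmin := PySem.List.min?_isMin hhi
      have hh : h ∈ xs ∧ h > t := by
        have := List.mem_filter.mp hhmem
        exact ⟨this.1, by simpa using this.2⟩
      have hhBound : ∀ x ∈ xs, x > t → h ≤ x := by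
        intro x hx hxt; exact hhmin x (List.mem_filter.mpr ⟨hx, by simp; omega⟩)
      by_cases hcmp : h - t < t - l
      · simp only [hcmp, if_true]
        refine ⟨hh.1, ?_⟩
        intro x hx
        by_cases hxt : x ≤ t
        · have := hlBound x hx hxt
          have := hh.2
          simp only [keyLt, pyAbs]; split_ifs <;> simp <;> omega
        · have := hhBound x hx (by omega)
          have := hh.2
          simp only [keyLt, pyAbs]; split_ifs <;> simp <;> omega
      · simp only [hcmp, if_false]
        refine ⟨hl.1, ?_⟩
        intro x hx
        by_cases hxt : x ≤ t
        · have := hlBound x hx hxt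
          have := hl.2
          simp only [keyLt, pyAbs]; split_ifs <;> simp <;> omega
        · have := hhBound x hx (by omega)
          have := hl.2; have := hh.2
          simp only [keyLt, pyAbs]; split_ifs <;> simp <;> omega

-- minimizers over lists with the same members are equal
theorem isMinKey_unique (t : Int) (xs ys : List Int) (hmem : ∀ z : Int, z ∈ xs ↔ z ∈ ys)
    (m1 m2 : Int) (h1 : IsMinKey t xs m1) (h2 : IsMinKey t ys m2) : m1 = m2 :=
  keyLt_antisymm t m1 m2 (h2.2 m1 ((hmem m1).mp h1.1)) (h1.2 m2 ((hmem m2).mpr h2.1))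

-- ===== VERDICT (by name: the statement is the Claim_ definition above) =====
theorem select_analysis_level_spec : Claim_equal_select_analysis_level := by
  intro al req defl _ hpre
  obtain ⟨hne, hsome⟩ := hpre
  unfold Spec_select_analysis_level select_analysis_level select_analysis_level_alt
  simp only []
  -- the sorted deduped list is nonempty
  have hsne : PySem.List.sorted (PySem.Set.ofList al) (fun x => x) false ≠ [] := by
    intro hcon
    apply hne
    have hof := (PySem.List.sorted_eq_nil_iff (PySem.Set.ofList al) (fun x : Int => x) false).mp hcon
    cases al with
    | nil => rfl
    | cons a0 al' =>
      exfalso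
      have hm : a0 ∈ PySem.Set.ofList (a0 :: al') := by
        simp [PySem.Set.mem_ofList]
      rw [hof] at hm
      simp at hm
  cases hs : PySem.List.sorted (PySem.Set.ofList al) (fun x => x) false with
  | nil => exact absurd hs hsne
  | cons h tl =>
    cases al with
    | nil => exact absurd rfl hne
    | cons a0 al' =>
      match req, defl with
      | none, none => exact absurd ⟨rfl, rfl⟩ hsome
      | some r, d =>
        -- target = r on both sides
        have hA := fold_min_isMinKey r tl h
        have hB := alt_choice_isMinKey r (a0 :: al') (by simp)
        have hmem : ∀ z : Int, z ∈ (h :: tl) ↔ z ∈ (a0 :: al') := by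
          intro z
          rw [← hs, PySem.List.mem_sorted, PySem.Set.mem_ofList]
        exact isMinKey_unique r (h :: tl) (a0 :: al') hmem _ _ hA hB
      | none, some d =>
        have hA := fold_min_isMinKey d tl h
        have hB := alt_choice_isMinKey d (a0 :: al') (by simp)
        have hmem : ∀ z : Int, z ∈ (h :: tl) ↔ z ∈ (a0 :: al') := by
          intro z
          rw [← hs, PySem.List.mem_sorted, PySem.Set.mem_ofList]
        exact isMinKey_unique d (h :: tl) (a0 :: al') hmem _ _ hA hB
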